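-- pv_equiv track=rewrite | github.com/ShrohanMohapatra/projectEulerProblems | ProjectEulerProblem494.py | prefixFamilyCheck
-- ===== SOURCE A (Python) =====
-- def prefixFamilyCheck(A, B):
-- 	nA = len(A)
-- 	nB = len(B)
-- 	flagVerif = nA == nB
-- 	if not(flagVerif): return flagVerif
-- 	for i in range(nA-1):
-- 		for j in range(i+1, nA):
-- 			flagVerif = flagVerif and (
-- 				(A[i] >= A[j] or B[i] < B[j]) and \
-- 				(B[i] >= B[j] or A[i] < A[j])
-- 				)
-- 	return flagVerif
-- ===== SOURCE B (Python) =====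
-- def prefixFamilyCheck(A, B):
--     if len(A) != len(B):
--         return False
--     n = len(A)
--     # A[k]*n - k encodes the pair (A[k], -k) lexicographically for 0 <= k < n
--     byA = sorted(range(n), key=lambda k: A[k] * n - k)
--     byB = sorted(range(n), key=lambda k: B[k] * n - k)
--     return byA == byB
-- ===== Notes on version B (the rewrite author's own statement) =====
-- stated objective: faster
-- what changed: Replaces the O(n^2) all-pairs scan with two O(n log n) argsorts (key A[k]*n-k encoding (A[k],-k) lexicographically) and a single list comparison: the pairwise condition holds iff both keys induce the same total order on indices.
import Mathlib
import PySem

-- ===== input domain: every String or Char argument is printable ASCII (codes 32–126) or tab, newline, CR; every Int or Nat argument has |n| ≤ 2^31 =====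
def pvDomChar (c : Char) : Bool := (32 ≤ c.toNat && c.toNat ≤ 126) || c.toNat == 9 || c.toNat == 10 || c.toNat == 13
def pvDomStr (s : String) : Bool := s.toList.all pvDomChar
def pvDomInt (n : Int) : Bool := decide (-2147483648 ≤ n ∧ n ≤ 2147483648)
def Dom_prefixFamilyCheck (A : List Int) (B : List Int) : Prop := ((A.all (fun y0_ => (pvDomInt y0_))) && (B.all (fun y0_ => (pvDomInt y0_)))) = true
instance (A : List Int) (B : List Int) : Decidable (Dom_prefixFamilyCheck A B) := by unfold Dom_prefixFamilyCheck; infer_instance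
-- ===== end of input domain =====

-- B replaces A's O(n^2) all-pairs scan by two argsorts under a composite key and one
-- list comparison (asymptotically faster in Python; equivalence of return values proved below).

-- ===== PORT A =====
def prefixFamilyCheck (A : List Int) (B : List Int) : Bool :=
  let nA : Int := A.length
  let nB : Int := B.length
  let flagVerif : Bool := nA == nB
  if !flagVerif then flagVerif
  else
    (PySem.List.pyRange 0 (nA - 1) 1).foldl
      (fun fl i =>
        (PySem.List.pyRange (i + 1) nA 1).foldl
          (fun fl j =>
            fl && ((decide (PySem.List.pyGetD A i 0 ≥ PySem.List.pyGetD A j 0) ||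
                    decide (PySem.List.pyGetD B i 0 < PySem.List.pyGetD B j 0)) &&
                   (decide (PySem.List.pyGetD B i 0 ≥ PySem.List.pyGetD B j 0) ||
                    decide (PySem.List.pyGetD A i 0 < PySem.List.pyGetD A j 0))))
          fl)
      flagVerif

-- ===== PORT B =====
def prefixFamilyCheck_alt (A : List Int) (B : List Int) : Bool :=
  if A.length ≠ B.length then false
  else
    let n : Int := A.length
    let byA := PySem.List.sorted (PySem.List.pyRange 0 n 1) (fun k => PySem.List.pyGetD A k 0 * n - k)
    let byB := PySem.List.sorted (PySem.List.pyRange 0 n 1) (fun k => PySem.List.pyGetD B k 0 * n - k)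
    byA == byB

-- ===== PRECONDITION & SPEC =====
def Spec_prefixFamilyCheck (A : List Int) (B : List Int) (out : Bool) : Prop := out = prefixFamilyCheck_alt A B
instance (A : List Int) (B : List Int) (out : Bool) : Decidable (Spec_prefixFamilyCheck A B out) := by unfold Spec_prefixFamilyCheck; infer_instance

-- ===== CLAIM (what is proved, stated in full; the proofs are below) =====
def Claim_equal_prefixFamilyCheck : Prop := ∀ (A : List Int) (B : List Int), Dom_prefixFamilyCheck A B → Spec_prefixFamilyCheck A B (prefixFamilyCheck A B)

-- ===== LEMMAS AND PROOFS =====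

-- folding `&&` over a list is the initial flag conjoined with `all`
lemma pvFoldlAnd (l : List Int) (p : Int → Bool) (b : Bool) :
    l.foldl (fun fl x => fl && p x) b = (b && l.all p) := by
  induction l generalizing b with
  | nil => simp
  | cons x t ih => simp [List.foldl_cons, ih, Bool.and_assoc]

-- A returns true iff lengths agree and every ordered pair is order-consistent
lemma pvA_iff (A B : List Int) :
    prefixFamilyCheck A B = true ↔
      (A.length = B.length ∧
        ∀ i j : Int, 0 ≤ i → i < j → j < (A.length : Int) →
          (PySem.List.pyGetD A i 0 < PySem.List.pyGetD A j 0 ↔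
           PySem.List.pyGetD B i 0 < PySem.List.pyGetD B j 0)) := by
  unfold prefixFamilyCheck
  by_cases h : A.length = B.length
  · have hb : ((A.length : Int) == (B.length : Int)) = true := by simp [h]
    simp only [hb, Bool.not_true, Bool.false_eq_true, if_false]
    simp only [pvFoldlAnd, Bool.true_and, List.all_eq_true, PySem.List.mem_pyRange_one,
      decide_eq_true_eq, Bool.and_eq_true, Bool.or_eq_true]
    refine ⟨fun hc => ⟨h, fun i j hi hij hjn => ?_⟩, fun hc i ⟨hi0, _⟩ j ⟨hj1, hj2⟩ => ?_⟩
    · have := hc i ⟨hi, by omega⟩ j ⟨by omega, hjn⟩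
      omega
    · have := hc.2 i j hi0 (by omega) hj2
      omega
  · have hb : ((A.length : Int) == (B.length : Int)) = false := by simp [h]
    simp [hb, h]

-- B returns true iff lengths agree and the two argsorts coincide
lemma pvB_iff (A B : List Int) :
    prefixFamilyCheck_alt A B = true ↔
      (A.length = B.length ∧
        PySem.List.sorted (PySem.List.pyRange 0 (A.length : Int) 1)
            (fun k => PySem.List.pyGetD A k 0 * (A.length : Int) - k) =
          PySem.List.sorted (PySem.List.pyRange 0 (A.length : Int) 1)
            (fun k => PySem.List.pyGetD B k 0 * (A.length : Int) - k)) := by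
  unfold prefixFamilyCheck_alt
  by_cases h : A.length = B.length
  · simp [h]
  · simp [h]

-- the composite key compares like the lexicographic pair (X[k], -k) on [0, n)
lemma pvKeyLt (X : List Int) (n u v : Int) (hu : 0 ≤ u) (hu2 : u < n) (hv : 0 ≤ v) (hv2 : v < n) :
    (PySem.List.pyGetD X u 0 * n - u < PySem.List.pyGetD X v 0 * n - v) ↔
      (PySem.List.pyGetD X u 0 < PySem.List.pyGetD X v 0 ∨
        (PySem.List.pyGetD X u 0 = PySem.List.pyGetD X v 0 ∧ v < u)) := by
  set a := PySem.List.pyGetD X u 0 with ha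
  set b := PySem.List.pyGetD X v 0 with hb
  rcases lt_trichotomy a b with h | h | h
  · have h1 : 1 * n ≤ (b - a) * n := mul_le_mul_of_nonneg_right (by omega) (by omega)
    exact iff_of_true (by nlinarith) (Or.inl h)
  · rw [h, sub_lt_sub_iff_left]
    constructor
    · intro hlt; exact Or.inr ⟨rfl, hlt⟩
    · rintro (hc | ⟨_, hc⟩) <;> omega
  · have h1 : 1 * n ≤ (a - b) * n := mul_le_mul_of_nonneg_right (by omega) (by omega)
    refine iff_of_false (by nlinarith) ?_
    rintro (hc | ⟨hc, _⟩) <;> omega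

-- the argsorts coincide iff all ordered pairs are order-consistent
lemma pvCore (A B : List Int) (n : Int) (hn : n = (A.length : Int)) :
    (PySem.List.sorted (PySem.List.pyRange 0 n 1) (fun k => PySem.List.pyGetD A k 0 * n - k) =
      PySem.List.sorted (PySem.List.pyRange 0 n 1) (fun k => PySem.List.pyGetD B k 0 * n - k)) ↔
      (∀ i j : Int, 0 ≤ i → i < j → j < n →
        (PySem.List.pyGetD A i 0 < PySem.List.pyGetD A j 0 ↔
         PySem.List.pyGetD B i 0 < PySem.List.pyGetD B j 0)) := by
  set keyA := fun k : Int => PySem.List.pyGetD A k 0 * n - k with hkA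
  set keyB := fun k : Int => PySem.List.pyGetD B k 0 * n - k with hkB
  set R := PySem.List.pyRange 0 n 1 with hR
  have hmemR : ∀ x, x ∈ R ↔ (0 ≤ x ∧ x < n) := fun x => PySem.List.mem_pyRange_one
  constructor
  · -- equal argsorts ⇒ every ordered pair order-consistent
    intro hs i j hi hij hjn
    have hiS : i ∈ PySem.List.sorted R keyA := by
      rw [PySem.List.mem_sorted, hmemR]; exact ⟨hi, by omega⟩
    have hjS : j ∈ PySem.List.sorted R keyA := by
      rw [PySem.List.mem_sorted, hmemR]; exact ⟨by omega, hjn⟩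
    obtain ⟨p, hp, hpe⟩ := List.mem_iff_getElem.mp hiS
    obtain ⟨q, hq, hqe⟩ := List.mem_iff_getElem.mp hjS
    have hPA := List.pairwise_iff_getElem.mp (PySem.List.sorted_pairwise R keyA)
    have hPB' := PySem.List.sorted_pairwise R keyB
    rw [← hs] at hPB'
    have hPB := List.pairwise_iff_getElem.mp hPB'
    have hpq : p ≠ q := by
      intro e; subst e; rw [hpe] at hqe; omega
    have eAij := pvKeyLt A n i j hi (by omega) (by omega) hjn
    have eAji := pvKeyLt A n j i (by omega) hjn hi (by omega)
    have eBij := pvKeyLt B n i j hi (by omega) (by omega) hjn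
    have eBji := pvKeyLt B n j i (by omega) hjn hi (by omega)
    rcases Nat.lt_or_ge p q with hlt | hge
    · have h1 : keyA i ≤ keyA j := by
        have := hPA p q hp hq hlt; rw [hpe, hqe] at this; exact this
      have h2 : keyB i ≤ keyB j := by
        have := hPB p q hp hq hlt; rw [hpe, hqe] at this; exact this
      have n1 : ¬ (keyA j < keyA i) := not_lt.mpr h1
      have n2 : ¬ (keyB j < keyB i) := not_lt.mpr h2
      rw [hkA] at n1; rw [hkB] at n2
      simp only [eAji] at n1; simp only [eBji] at n2
      omega
    · have hlt : q < p := Nat.lt_of_le_of_ne hge (Ne.symm hpq)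
      have h1 : keyA j ≤ keyA i := by
        have := hPA q p hq hp hlt; rw [hpe, hqe] at this; exact this
      have h2 : keyB j ≤ keyB i := by
        have := hPB q p hq hp hlt; rw [hpe, hqe] at this; exact this
      have n1 : ¬ (keyA i < keyA j) := not_lt.mpr h1
      have n2 : ¬ (keyB i < keyB j) := not_lt.mpr h2
      rw [hkA] at n1; rw [hkB] at n2
      simp only [eAij] at n1; simp only [eBij] at n2
      omega
  · -- order-consistent ⇒ equal argsorts
    intro h
    -- the two keys induce the same strict order on members of R
    have hag : ∀ u ∈ R, ∀ v ∈ R, (keyA u < keyA v ↔ keyB u < keyB v) := by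
      intro u hu v hv
      rw [hmemR] at hu hv
      rw [hkA, hkB]
      rcases lt_trichotomy u v with huv | huv | huv
      · rw [pvKeyLt A n u v hu.1 hu.2 hv.1 hv.2, pvKeyLt B n u v hu.1 hu.2 hv.1 hv.2]
        have := h u v hu.1 huv hv.2
        omega
      · rw [huv]; simp
      · rw [pvKeyLt A n u v hu.1 hu.2 hv.1 hv.2, pvKeyLt B n u v hu.1 hu.2 hv.1 hv.2]
        have := h v u hv.1 huv hu.2
        omega
    have hperm : (PySem.List.sorted R keyA).Perm R := PySem.List.sorted_perm R keyA false
    have hmemS : ∀ x ∈ PySem.List.sorted R keyA, x ∈ R := fun x hx =>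
      (PySem.List.mem_sorted R keyA false x).mp hx
    have hnd : (PySem.List.sorted R keyA).Nodup :=
      hperm.nodup_iff.mpr (PySem.List.nodup_pyRange_one 0 n)
    -- strict keyA-increase along the argsort
    have hPlt : (PySem.List.sorted R keyA).Pairwise (fun a b => keyA a < keyA b) := by
      have hle := List.pairwise_iff_getElem.mp (PySem.List.sorted_pairwise R keyA)
      have hne := List.pairwise_iff_getElem.mp hnd
      rw [List.pairwise_iff_getElem]
      intro p q hp hq hpq
      have h1 := hle p q hp hq hpq
      have h2 := hne p q hp hq hpq
      have hu := (hmemR _).mp (hmemS _ (List.getElem_mem hp))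
      have hv := (hmemR _).mp (hmemS _ (List.getElem_mem hq))
      generalize hx : (PySem.List.sorted R keyA)[p] = x at h1 h2 hu ⊢
      generalize hy : (PySem.List.sorted R keyA)[q] = y at h1 h2 hv ⊢
      rcases lt_or_eq_of_le h1 with hlt | heq
      · exact hlt
      · exfalso
        simp only [hkA] at heq
        have d1 := pvKeyLt A n x y hu.1 hu.2 hv.1 hv.2
        have d2 := pvKeyLt A n y x hv.1 hv.2 hu.1 hu.2
        omega
    -- hence strict keyB-increase as well, and uniqueness of the strictly sorted permutation
    have hPltB : (PySem.List.sorted R keyA).Pairwise (fun a b => keyB a < keyB b) :=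
      hPlt.imp_of_mem (fun {a b} ha hb hab => (hag a (hmemS a ha) b (hmemS b hb)).mp hab)
    exact (PySem.List.sorted_eq_of_perm_of_pairwise_lt R (PySem.List.sorted R keyA) keyB
      hperm hPltB).symm

-- ===== VERDICT (by name: the statement is the Claim_ definition above) =====
theorem prefixFamilyCheck_spec : Claim_equal_prefixFamilyCheck := by
  intro A B _hdom
  unfold Spec_prefixFamilyCheck
  have hA := pvA_iff A B
  have hB := pvB_iff A B
  have hC := pvCore A B (A.length : Int) rfl
  cases hPA : prefixFamilyCheck A B with
  | true =>
      rcases hA.mp hPA with ⟨hlen, hcond⟩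
      exact (hB.mpr ⟨hlen, hC.mpr hcond⟩).symm
  | false =>
      cases hPB : prefixFamilyCheck_alt A B with
      | false => rfl
      | true =>
          rcases hB.mp hPB with ⟨hlen, hsor⟩
          have : prefixFamilyCheck A B = true := hA.mpr ⟨hlen, hC.mp hsor⟩
          rw [hPA] at this; exact this
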